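-- pv_equiv track=rewrite | github.com/FinalYear-Team14/frameweaver-storyboard | code/storyboard_generator.py | extract_key_elements
-- ===== SOURCE A (Python) =====
-- def extract_key_elements(story_text):
--     """Splits story_text into scenes using 'Scene' as markers."""
--     scenes, current_scene = [], []
--     for line in story_text.splitlines():
--         line = line.strip()
--         if line.lower().startswith("scene") or line.startswith("**Scene"):
--             if current_scene:
--                 scenes.append(" ".join(current_scene))
--                 current_scene = []
--             current_scene.append(line)
--         elif line:
--             current_scene.append(line)
--     if current_scene:
--         scenes.append(" ".join(current_scene))
--
--     if not scenes:
--         scenes = [story_text]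
--
--     return scenes
-- ===== SOURCE B (Python) =====
-- def _is_marker(s):
--     return s.lower().startswith("scene") or s.startswith("**Scene")
--
--
-- def _segments(lines):
--     # each call emits one segment: the head line plus all following non-marker lines
--     if not lines:
--         return []
--     i = 1
--     while i < len(lines) and not _is_marker(lines[i]):
--         i += 1
--     return [" ".join(lines[:i])] + _segments(lines[i:])
--
--
-- def extract_key_elements(story_text):
--     """Splits story_text into scenes using 'Scene' as markers."""
--     cleaned = [s for s in (l.strip() for l in story_text.splitlines()) if s]
--     result = _segments(cleaned)
--     return result if result else [story_text]
-- ===== Notes on version B (the rewrite author's own statement) =====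
-- stated objective: alternative
-- what changed: B replaces A's single stateful accumulator loop by a two-phase decomposition: a cleaning pass (strip + drop empty lines) followed by a recursive partition that emits one marker-headed segment per call.
import Mathlib
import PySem

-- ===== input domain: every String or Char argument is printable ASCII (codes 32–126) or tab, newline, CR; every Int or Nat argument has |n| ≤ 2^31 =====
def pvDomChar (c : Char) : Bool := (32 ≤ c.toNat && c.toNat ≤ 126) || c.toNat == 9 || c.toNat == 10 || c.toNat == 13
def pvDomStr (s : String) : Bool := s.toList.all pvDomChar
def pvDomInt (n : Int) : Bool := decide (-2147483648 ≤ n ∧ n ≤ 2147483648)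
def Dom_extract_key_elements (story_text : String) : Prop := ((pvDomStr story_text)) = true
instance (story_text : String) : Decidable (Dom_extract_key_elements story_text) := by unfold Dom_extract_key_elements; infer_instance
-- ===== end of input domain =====

-- B computes the same scenes by a two-phase decomposition (cleaning pass, then a recursive partition at the marker lines) instead of A's single stateful accumulator loop; same cost.

-- ===== PORT A =====
def extract_key_elements (story_text : String) : List String :=
  let p := (PySem.Str.splitlines story_text).foldl
    (fun (st : List String × List String) line =>
      let l := PySem.Str.strip line
      if PySem.Str.startswith (PySem.Str.lower l) "scene" || PySem.Str.startswith l "**Scene" then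
        ((if st.2 ≠ [] then st.1 ++ [PySem.Str.join " " st.2] else st.1), [l])
      else if l ≠ "" then (st.1, st.2 ++ [l])
      else st) ([], [])
  let scenes := if p.2 ≠ [] then p.1 ++ [PySem.Str.join " " p.2] else p.1
  if scenes = [] then [story_text] else scenes

-- ===== PORT B =====
def akeIsMarker (s : String) : Bool :=
  PySem.Str.startswith (PySem.Str.lower s) "scene" || PySem.Str.startswith s "**Scene"

-- _segments: the head line plus the following non-marker lines form one segment; recurse on the rest
def akeSegments : List String → List String
  | [] => []
  | x :: xs =>
    PySem.Str.join " " (x :: xs.takeWhile (fun s => !akeIsMarker s)) ::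
      akeSegments (xs.dropWhile (fun s => !akeIsMarker s))
termination_by l => l.length
decreasing_by
  exact Nat.lt_succ_of_le (List.length_dropWhile_le _ _)

def extract_key_elements_alt (story_text : String) : List String :=
  let cleaned := ((PySem.Str.splitlines story_text).map PySem.Str.strip).filter (fun s => s ≠ "")
  let result := akeSegments cleaned
  if result = [] then [story_text] else result

-- ===== PRECONDITION & SPEC =====
def Spec_extract_key_elements (story_text : String) (out : List String) : Prop := out = extract_key_elements_alt story_text
instance (story_text : String) (out : List String) : Decidable (Spec_extract_key_elements story_text out) := by unfold Spec_extract_key_elements; infer_instance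

-- ===== CLAIM (what is proved, stated in full; the proofs are below) =====
def Claim_equal_extract_key_elements : Prop := ∀ (story_text : String), Dom_extract_key_elements story_text → Spec_extract_key_elements story_text (extract_key_elements story_text)

-- ===== LEMMAS AND PROOFS =====

-- A's loop step, specialised to an already-stripped, non-empty line.
def akeStepC (st : List String × List String) (l : String) : List String × List String :=
  if akeIsMarker l then ((if st.2 ≠ [] then st.1 ++ [PySem.Str.join " " st.2] else st.1), [l])
  else (st.1, st.2 ++ [l])

-- A's final flush of the pending scene.
def akeFin (p : List String × List String) : List String :=
  if p.2 ≠ [] then p.1 ++ [PySem.Str.join " " p.2] else p.1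

lemma akeIsMarker_empty : akeIsMarker "" = false := by decide

-- A's fold over the raw lines equals the fold of akeStepC over B's cleaned line list.
lemma ake_fold_clean (lines : List String) (st : List String × List String) :
    lines.foldl
      (fun (st : List String × List String) line =>
        let l := PySem.Str.strip line
        if PySem.Str.startswith (PySem.Str.lower l) "scene" || PySem.Str.startswith l "**Scene" then
          ((if st.2 ≠ [] then st.1 ++ [PySem.Str.join " " st.2] else st.1), [l])
        else if l ≠ "" then (st.1, st.2 ++ [l])
        else st) st
    = ((lines.map PySem.Str.strip).filter (fun s => s ≠ "")).foldl akeStepC st := by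
  induction lines generalizing st with
  | nil => simp
  | cons x xs ih =>
    have h0 := akeIsMarker_empty
    simp only [akeIsMarker, Bool.or_eq_false_iff] at h0
    simp only [List.foldl_cons, List.map_cons, List.filter_cons]
    by_cases hx : PySem.Str.strip x = ""
    · simp only [hx, h0.1, h0.2, Bool.or_self, ne_eq, not_true_eq_false, if_false,
        decide_false, Bool.false_eq_true]
      exact ih st
    · have hstep : akeStepC st (PySem.Str.strip x)
          = if PySem.Str.startswith (PySem.Str.lower (PySem.Str.strip x)) "scene"
              || PySem.Str.startswith (PySem.Str.strip x) "**Scene" then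
              ((if st.2 ≠ [] then st.1 ++ [PySem.Str.join " " st.2] else st.1), [PySem.Str.strip x])
            else (st.1, st.2 ++ [PySem.Str.strip x]) := by
        simp only [akeStepC, akeIsMarker]
        rfl
      simp only [hx, ne_eq, not_false_eq_true, if_true, decide_true, List.foldl_cons]
      rw [← hstep]
      exact ih _
-- the cleaned fold, finished, is exactly B's recursive partition (generalized over the running state)
lemma ake_fold_seg (c : List String) (scenes cur : List String) :
    akeFin (c.foldl akeStepC (scenes, cur))
    = scenes ++ (if cur = [] then akeSegments c
        else PySem.Str.join " " (cur ++ c.takeWhile (fun s => !akeIsMarker s)) ::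
          akeSegments (c.dropWhile (fun s => !akeIsMarker s))) := by
  induction c generalizing scenes cur with
  | nil =>
    by_cases hc : cur = [] <;> simp [akeFin, akeSegments, hc]
  | cons x xs ih =>
    rw [List.foldl_cons]
    by_cases hm : akeIsMarker x = true
    · have hstep : akeStepC (scenes, cur) x
          = ((if cur ≠ [] then scenes ++ [PySem.Str.join " " cur] else scenes), [x]) := by
        simp [akeStepC, hm]
      rw [hstep, ih]
      by_cases hc : cur = [] <;> simp [hc, hm, akeSegments]
    · have hstep : akeStepC (scenes, cur) x = (scenes, cur ++ [x]) := by
        simp [akeStepC, hm]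
      rw [hstep, ih]
      simp only [List.takeWhile_cons, List.dropWhile_cons, hm, Bool.not_false, if_true]
      by_cases hc : cur = [] <;> simp [hc, akeSegments]

-- ===== VERDICT (by name: the statement is the Claim_ definition above) =====
theorem extract_key_elements_spec : Claim_equal_extract_key_elements := by
  intro story_text _
  unfold Spec_extract_key_elements
  simp only [extract_key_elements, extract_key_elements_alt]
  rw [ake_fold_clean]
  have h := ake_fold_seg
    (((PySem.Str.splitlines story_text).map PySem.Str.strip).filter (fun t => t ≠ "")) [] []
  rw [if_pos rfl] at h
  simp only [List.nil_append] at h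
  unfold akeFin at h
  rw [h]
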